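-- pv_equiv track=rewrite | github.com/DevSHIBBY/paa1382_crc_decoder | check_crc.py | compute_crc_from_6bytes
-- ===== SOURCE A (Python) =====
-- def bit(byte, n):
--     """n: 7 = MSB .. 0 = LSB"""
--     return (byte >> n) & 1
--
-- def compute_crc_from_6bytes(B):
--     # B = [B0, B1, B2, B3, B4, B5] (les 6 octets utiles)
--     crc = [0]*16
--     crc[0]  = bit(B[0],0) ^ bit(B[3],2) ^ bit(B[4],4) ^ bit(B[4],0) ^ bit(B[5],6) ^ bit(B[5],3)
--     crc[1]  = bit(B[0],4) ^ bit(B[4],5) ^ bit(B[4],1) ^ bit(B[5],7) ^ bit(B[5],4)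
--     crc[2]  = bit(B[0],7) ^ bit(B[0],4) ^ bit(B[3],4) ^ bit(B[4],6) ^ bit(B[4],2) ^ bit(B[4],0) ^ bit(B[5],5)
--     crc[3]  = bit(B[0],7) ^ bit(B[0],4) ^ bit(B[3],5) ^ bit(B[4],7) ^ bit(B[4],3) ^ bit(B[4],1) ^ bit(B[5],6)
--     crc[4]  = bit(B[0],0) ^ bit(B[3],4) ^ bit(B[3],2) ^ bit(B[4],5) ^ bit(B[4],3) ^ bit(B[4],2) ^ bit(B[4],0) ^ bit(B[5],7) ^ bit(B[5],6) ^ bit(B[5],2) ^ bit(B[5],0)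
--     crc[5]  = bit(B[3],5) ^ bit(B[3],4) ^ bit(B[3],2) ^ bit(B[4],6) ^ bit(B[4],4) ^ bit(B[4],3) ^ bit(B[4],1) ^ bit(B[4],0) ^ bit(B[5],7) ^ bit(B[5],3) ^ bit(B[5],1)
--     crc[6]  = bit(B[0],7) ^ bit(B[0],4) ^ bit(B[0],0) ^ bit(B[3],5) ^ bit(B[3],4) ^ bit(B[3],2) ^ bit(B[4],7) ^ bit(B[4],3) ^ bit(B[4],2) ^ bit(B[4],1) ^ bit(B[5],6) ^ bit(B[5],4) ^ bit(B[5],0)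
--     crc[7]  = bit(B[0],4) ^ bit(B[0],0) ^ bit(B[3],6) ^ bit(B[3],5) ^ bit(B[4],4) ^ bit(B[4],3) ^ bit(B[4],2) ^ bit(B[5],7) ^ bit(B[5],5) ^ bit(B[5],1)
--     crc[8]  = bit(B[0],7) ^ bit(B[0],4) ^ bit(B[3],6) ^ bit(B[3],2) ^ bit(B[4],7) ^ bit(B[4],6) ^ bit(B[4],5) ^ bit(B[4],3) ^ bit(B[5],7) ^ bit(B[5],6) ^ bit(B[5],1) ^ bit(B[5],0)
--     crc[9]  = bit(B[0],4) ^ bit(B[3],6) ^ bit(B[3],4) ^ bit(B[4],5) ^ bit(B[4],4) ^ bit(B[4],3) ^ bit(B[4],0) ^ bit(B[5],6) ^ bit(B[5],2) ^ bit(B[5],0)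
--     crc[10] = bit(B[0],7) ^ bit(B[3],6) ^ bit(B[3],5) ^ bit(B[3],2) ^ bit(B[4],6) ^ bit(B[4],3) ^ bit(B[4],1) ^ bit(B[4],0) ^ bit(B[5],7) ^ bit(B[5],6) ^ bit(B[5],3) ^ bit(B[5],2) ^ bit(B[5],1) ^ bit(B[5],0)
--     crc[11] = bit(B[0],4) ^ bit(B[0],0) ^ bit(B[3],2) ^ bit(B[4],7) ^ bit(B[4],5) ^ bit(B[4],3) ^ bit(B[4],2) ^ bit(B[4],1) ^ bit(B[5],7) ^ bit(B[5],6) ^ bit(B[5],4) ^ bit(B[5],3) ^ bit(B[5],1) ^ bit(B[5],0)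
--     crc[12] = bit(B[0],7) ^ bit(B[0],4) ^ bit(B[4],6) ^ bit(B[4],4) ^ bit(B[4],3) ^ bit(B[4],2) ^ bit(B[4],0) ^ bit(B[5],7) ^ bit(B[5],5) ^ bit(B[5],4) ^ bit(B[5],2) ^ bit(B[5],1)
--     crc[13] = bit(B[0],4) ^ bit(B[0],0) ^ bit(B[3],6) ^ bit(B[4],7) ^ bit(B[4],1) ^ bit(B[5],5) ^ bit(B[5],3) ^ bit(B[5],0)
--     crc[14] = bit(B[0],4) ^ bit(B[0],0) ^ bit(B[3],2) ^ bit(B[4],2) ^ bit(B[5],6) ^ bit(B[5],4) ^ bit(B[5],1)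
--     crc[15] = bit(B[0],7) ^ bit(B[0],0) ^ bit(B[4],3) ^ bit(B[5],7) ^ bit(B[5],5) ^ bit(B[5],2)
--
--     low = 0
--     high = 0
--     for i in range(8):
--         low  |= (crc[i] & 1) << i
--     for i in range(8,16):
--         high |= (crc[i] & 1) << (i-8)
--
--     return (low, high, (low << 8) | high)
-- ===== SOURCE B (Python) =====
-- # The CRC is a GF(2) linear map of the input bits: instead of computing each output
-- # bit as an XOR of input bits, accumulate per-INPUT-bit column masks. _COLUMNS[j][n]
-- # is the 16-bit contribution of input bit n of byte j, split as (mask over crc[0..7],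
-- # mask over crc[8..15]); XOR the masks of the set input bits into two accumulators.
-- _COLUMNS = [
--     (0, [(209, 232), (0, 0), (0, 0), (0, 0), (206, 123), (0, 0), (0, 0), (76, 149)]),
--     (3, [(0, 0), (0, 0), (113, 77), (0, 0), (116, 2), (232, 4), (128, 39), (0, 0)]),
--     (4, [(53, 22), (106, 44), (212, 88), (248, 159), (161, 18), (18, 11), (36, 21), (72, 41)]),
--     (5, [(80, 47), (160, 93), (16, 150), (33, 44), (66, 88), (132, 176), (89, 79), (178, 157)]),
-- ]
--
-- def compute_crc_from_6bytes(B):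
--     low = 0
--     high = 0
--     for j, cols in _COLUMNS:
--         b = B[j]
--         for n in range(8):
--             if (b >> n) & 1:
--                 lo_m, hi_m = cols[n]
--                 low ^= lo_m
--                 high ^= hi_m
--     return (low, high, (low << 8) | high)
-- ===== Notes on version B (the rewrite author's own statement) =====
-- stated objective: alternative
-- what changed: Treats the CRC as a GF(2) linear map and transposes the computation: instead of 16 output-bit formulas each XORing input bits, B walks the input bits once and XOR-accumulates a precomputed 16-bit column mask (the bit's contribution to all CRC bits) into low/high accumulators.
import Mathlib
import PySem

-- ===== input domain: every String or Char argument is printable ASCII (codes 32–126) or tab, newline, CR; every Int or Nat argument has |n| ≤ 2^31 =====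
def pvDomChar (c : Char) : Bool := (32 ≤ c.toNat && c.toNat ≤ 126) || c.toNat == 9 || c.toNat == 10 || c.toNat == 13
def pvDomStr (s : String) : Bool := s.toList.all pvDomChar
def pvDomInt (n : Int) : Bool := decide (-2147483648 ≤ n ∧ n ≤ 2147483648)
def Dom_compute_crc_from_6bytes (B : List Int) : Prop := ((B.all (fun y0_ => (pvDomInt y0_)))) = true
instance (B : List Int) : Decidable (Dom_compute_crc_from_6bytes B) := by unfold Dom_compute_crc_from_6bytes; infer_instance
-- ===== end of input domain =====

-- B views the CRC as a GF(2) linear map: it XOR-accumulates per-input-bit column masks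
-- instead of computing each output bit as its own XOR of input bits (objective: alternative).

-- ===== PORT A =====
-- bit(byte, n) = (byte >> n) & 1 ; Lean's >>> on Int is Python's arithmetic shift
def pvBit (byte : Int) (n : Nat) : Int := PySem.Int.band (byte >>> n) 1

def compute_crc_from_6bytes (B : List Int) : Int × Int × Int :=
  -- B[i]; .getD 0 is reached only when Python raises IndexError, excluded by Pre_
  let g : Nat → Int := fun i => (PySem.List.pyGet? B (i : Int)).getD 0
  let crc : List Int := [
    (PySem.Int.bxor (PySem.Int.bxor (PySem.Int.bxor (PySem.Int.bxor (PySem.Int.bxor (pvBit (g 0) 0) (pvBit (g 3) 2)) (pvBit (g 4) 4)) (pvBit (g 4) 0)) (pvBit (g 5) 6)) (pvBit (g 5) 3)),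
    (PySem.Int.bxor (PySem.Int.bxor (PySem.Int.bxor (PySem.Int.bxor (pvBit (g 0) 4) (pvBit (g 4) 5)) (pvBit (g 4) 1)) (pvBit (g 5) 7)) (pvBit (g 5) 4)),
    (PySem.Int.bxor (PySem.Int.bxor (PySem.Int.bxor (PySem.Int.bxor (PySem.Int.bxor (PySem.Int.bxor (pvBit (g 0) 7) (pvBit (g 0) 4)) (pvBit (g 3) 4)) (pvBit (g 4) 6)) (pvBit (g 4) 2)) (pvBit (g 4) 0)) (pvBit (g 5) 5)),
    (PySem.Int.bxor (PySem.Int.bxor (PySem.Int.bxor (PySem.Int.bxor (PySem.Int.bxor (PySem.Int.bxor (pvBit (g 0) 7) (pvBit (g 0) 4)) (pvBit (g 3) 5)) (pvBit (g 4) 7)) (pvBit (g 4) 3)) (pvBit (g 4) 1)) (pvBit (g 5) 6)),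
    (PySem.Int.bxor (PySem.Int.bxor (PySem.Int.bxor (PySem.Int.bxor (PySem.Int.bxor (PySem.Int.bxor (PySem.Int.bxor (PySem.Int.bxor (PySem.Int.bxor (PySem.Int.bxor (pvBit (g 0) 0) (pvBit (g 3) 4)) (pvBit (g 3) 2)) (pvBit (g 4) 5)) (pvBit (g 4) 3)) (pvBit (g 4) 2)) (pvBit (g 4) 0)) (pvBit (g 5) 7)) (pvBit (g 5) 6)) (pvBit (g 5) 2)) (pvBit (g 5) 0)),
    (PySem.Int.bxor (PySem.Int.bxor (PySem.Int.bxor (PySem.Int.bxor (PySem.Int.bxor (PySem.Int.bxor (PySem.Int.bxor (PySem.Int.bxor (PySem.Int.bxor (PySem.Int.bxor (pvBit (g 3) 5) (pvBit (g 3) 4)) (pvBit (g 3) 2)) (pvBit (g 4) 6)) (pvBit (g 4) 4)) (pvBit (g 4) 3)) (pvBit (g 4) 1)) (pvBit (g 4) 0)) (pvBit (g 5) 7)) (pvBit (g 5) 3)) (pvBit (g 5) 1)),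
    (PySem.Int.bxor (PySem.Int.bxor (PySem.Int.bxor (PySem.Int.bxor (PySem.Int.bxor (PySem.Int.bxor (PySem.Int.bxor (PySem.Int.bxor (PySem.Int.bxor (PySem.Int.bxor (PySem.Int.bxor (PySem.Int.bxor (pvBit (g 0) 7) (pvBit (g 0) 4)) (pvBit (g 0) 0)) (pvBit (g 3) 5)) (pvBit (g 3) 4)) (pvBit (g 3) 2)) (pvBit (g 4) 7)) (pvBit (g 4) 3)) (pvBit (g 4) 2)) (pvBit (g 4) 1)) (pvBit (g 5) 6)) (pvBit (g 5) 4)) (pvBit (g 5) 0)),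
    (PySem.Int.bxor (PySem.Int.bxor (PySem.Int.bxor (PySem.Int.bxor (PySem.Int.bxor (PySem.Int.bxor (PySem.Int.bxor (PySem.Int.bxor (PySem.Int.bxor (pvBit (g 0) 4) (pvBit (g 0) 0)) (pvBit (g 3) 6)) (pvBit (g 3) 5)) (pvBit (g 4) 4)) (pvBit (g 4) 3)) (pvBit (g 4) 2)) (pvBit (g 5) 7)) (pvBit (g 5) 5)) (pvBit (g 5) 1)),
    (PySem.Int.bxor (PySem.Int.bxor (PySem.Int.bxor (PySem.Int.bxor (PySem.Int.bxor (PySem.Int.bxor (PySem.Int.bxor (PySem.Int.bxor (PySem.Int.bxor (PySem.Int.bxor (PySem.Int.bxor (pvBit (g 0) 7) (pvBit (g 0) 4)) (pvBit (g 3) 6)) (pvBit (g 3) 2)) (pvBit (g 4) 7)) (pvBit (g 4) 6)) (pvBit (g 4) 5)) (pvBit (g 4) 3)) (pvBit (g 5) 7)) (pvBit (g 5) 6)) (pvBit (g 5) 1)) (pvBit (g 5) 0)),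
    (PySem.Int.bxor (PySem.Int.bxor (PySem.Int.bxor (PySem.Int.bxor (PySem.Int.bxor (PySem.Int.bxor (PySem.Int.bxor (PySem.Int.bxor (PySem.Int.bxor (pvBit (g 0) 4) (pvBit (g 3) 6)) (pvBit (g 3) 4)) (pvBit (g 4) 5)) (pvBit (g 4) 4)) (pvBit (g 4) 3)) (pvBit (g 4) 0)) (pvBit (g 5) 6)) (pvBit (g 5) 2)) (pvBit (g 5) 0)),
    (PySem.Int.bxor (PySem.Int.bxor (PySem.Int.bxor (PySem.Int.bxor (PySem.Int.bxor (PySem.Int.bxor (PySem.Int.bxor (PySem.Int.bxor (PySem.Int.bxor (PySem.Int.bxor (PySem.Int.bxor (PySem.Int.bxor (PySem.Int.bxor (pvBit (g 0) 7) (pvBit (g 3) 6)) (pvBit (g 3) 5)) (pvBit (g 3) 2)) (pvBit (g 4) 6)) (pvBit (g 4) 3)) (pvBit (g 4) 1)) (pvBit (g 4) 0)) (pvBit (g 5) 7)) (pvBit (g 5) 6)) (pvBit (g 5) 3)) (pvBit (g 5) 2)) (pvBit (g 5) 1)) (pvBit (g 5) 0)),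
    (PySem.Int.bxor (PySem.Int.bxor (PySem.Int.bxor (PySem.Int.bxor (PySem.Int.bxor (PySem.Int.bxor (PySem.Int.bxor (PySem.Int.bxor (PySem.Int.bxor (PySem.Int.bxor (PySem.Int.bxor (PySem.Int.bxor (PySem.Int.bxor (pvBit (g 0) 4) (pvBit (g 0) 0)) (pvBit (g 3) 2)) (pvBit (g 4) 7)) (pvBit (g 4) 5)) (pvBit (g 4) 3)) (pvBit (g 4) 2)) (pvBit (g 4) 1)) (pvBit (g 5) 7)) (pvBit (g 5) 6)) (pvBit (g 5) 4)) (pvBit (g 5) 3)) (pvBit (g 5) 1)) (pvBit (g 5) 0)),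
    (PySem.Int.bxor (PySem.Int.bxor (PySem.Int.bxor (PySem.Int.bxor (PySem.Int.bxor (PySem.Int.bxor (PySem.Int.bxor (PySem.Int.bxor (PySem.Int.bxor (PySem.Int.bxor (PySem.Int.bxor (pvBit (g 0) 7) (pvBit (g 0) 4)) (pvBit (g 4) 6)) (pvBit (g 4) 4)) (pvBit (g 4) 3)) (pvBit (g 4) 2)) (pvBit (g 4) 0)) (pvBit (g 5) 7)) (pvBit (g 5) 5)) (pvBit (g 5) 4)) (pvBit (g 5) 2)) (pvBit (g 5) 1)),
    (PySem.Int.bxor (PySem.Int.bxor (PySem.Int.bxor (PySem.Int.bxor (PySem.Int.bxor (PySem.Int.bxor (PySem.Int.bxor (pvBit (g 0) 4) (pvBit (g 0) 0)) (pvBit (g 3) 6)) (pvBit (g 4) 7)) (pvBit (g 4) 1)) (pvBit (g 5) 5)) (pvBit (g 5) 3)) (pvBit (g 5) 0)),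
    (PySem.Int.bxor (PySem.Int.bxor (PySem.Int.bxor (PySem.Int.bxor (PySem.Int.bxor (PySem.Int.bxor (pvBit (g 0) 4) (pvBit (g 0) 0)) (pvBit (g 3) 2)) (pvBit (g 4) 2)) (pvBit (g 5) 6)) (pvBit (g 5) 4)) (pvBit (g 5) 1)),
    (PySem.Int.bxor (PySem.Int.bxor (PySem.Int.bxor (PySem.Int.bxor (PySem.Int.bxor (pvBit (g 0) 7) (pvBit (g 0) 0)) (pvBit (g 4) 3)) (pvBit (g 5) 7)) (pvBit (g 5) 5)) (pvBit (g 5) 2))]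
  let low : Int := (PySem.List.pyRange 0 8 1).foldl
    (fun low i => PySem.Int.bor low (PySem.Int.band (PySem.List.pyGetD crc i 0) 1 <<< i.toNat)) 0
  let high : Int := (PySem.List.pyRange 8 16 1).foldl
    (fun high i => PySem.Int.bor high (PySem.Int.band (PySem.List.pyGetD crc i 0) 1 <<< (i - 8).toNat)) 0
  (low, high, PySem.Int.bor (low <<< 8) high)

-- ===== PORT B =====
-- _COLUMNS: per input bit (byte j, bit n) its contribution masks to crc[0..7] and crc[8..15]
def pvColumns : List (Nat × List (Int × Int)) := [
  (0, [(209, 232), (0, 0), (0, 0), (0, 0), (206, 123), (0, 0), (0, 0), (76, 149)]),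
  (3, [(0, 0), (0, 0), (113, 77), (0, 0), (116, 2), (232, 4), (128, 39), (0, 0)]),
  (4, [(53, 22), (106, 44), (212, 88), (248, 159), (161, 18), (18, 11), (36, 21), (72, 41)]),
  (5, [(80, 47), (160, 93), (16, 150), (33, 44), (66, 88), (132, 176), (89, 79), (178, 157)])]

def compute_crc_from_6bytes_alt (B : List Int) : Int × Int × Int :=
  let lh : Int × Int := pvColumns.foldl (fun lh jc =>
    let b : Int := (PySem.List.pyGet? B (jc.1 : Int)).getD 0
    (PySem.List.pyRange 0 8 1).foldl (fun lh n =>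
      let k : Nat := n.toNat
      if PySem.Int.band (b >>> k) 1 ≠ 0 then
        (PySem.Int.bxor lh.1 (PySem.List.pyGetD jc.2 n (0, 0)).1,
         PySem.Int.bxor lh.2 (PySem.List.pyGetD jc.2 n (0, 0)).2)
      else lh) lh) (0, 0)
  (lh.1, lh.2, PySem.Int.bor (lh.1 <<< 8) lh.2)

-- ===== PRECONDITION & SPEC =====
-- A indexes B[5]; on lists shorter than 6 Python raises IndexError, so those are excluded.
def Pre_compute_crc_from_6bytes (B : List Int) : Prop := 6 ≤ B.length
instance (B : List Int) : Decidable (Pre_compute_crc_from_6bytes B) := by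
  unfold Pre_compute_crc_from_6bytes; infer_instance
def pvWitness_compute_crc_from_6bytes : List Int := [1, 2, 3, 4, 5, 6]

def Spec_compute_crc_from_6bytes (B : List Int) (out : Int × Int × Int) : Prop := out = compute_crc_from_6bytes_alt B
instance (B : List Int) (out : Int × Int × Int) : Decidable (Spec_compute_crc_from_6bytes B out) := by unfold Spec_compute_crc_from_6bytes; infer_instance

-- ===== CLAIM (what is proved, stated in full; the proofs are below) =====
def Claim_equal_compute_crc_from_6bytes : Prop := ∀ (B : List Int), Dom_compute_crc_from_6bytes B → Pre_compute_crc_from_6bytes B → Spec_compute_crc_from_6bytes B (compute_crc_from_6bytes B)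

-- ===== LEMMAS AND PROOFS =====
-- 0/1-valued Ints as Booleans
def pvIB (p : Bool) : Int := if p then 1 else 0

lemma pvBand1 (a : Int) : PySem.Int.band a 1 = 0 ∨ PySem.Int.band a 1 = 1 := by
  rw [PySem.Int.band_one]
  simp only [PySem.Int.mod]
  rw [Int.fmod_eq_emod_of_nonneg _ (by norm_num)]
  omega

lemma pvAtom (a : Int) : ∃ p : Bool, PySem.Int.band a 1 = pvIB p := by
  rcases pvBand1 a with h | h
  · exact ⟨false, by simp [pvIB, h]⟩
  · exact ⟨true, by simp [pvIB, h]⟩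

lemma pvXorIB (p q : Bool) : PySem.Int.bxor (pvIB p) (pvIB q) = pvIB (p ^^ q) := by
  cases p <;> cases q <;> decide

lemma pvBandIB (p : Bool) : PySem.Int.band (pvIB p) 1 = pvIB p := by cases p <;> decide

lemma pvBxor0 (a : Int) : PySem.Int.bxor 0 a = a := by
  rw [PySem.Int.bxor_comm, PySem.Int.bxor_zero]

-- Python truthiness of '(b >> n) & 1' turned into a multiply-by-bit XOR term
lemma pv_ite (a : Int) (lh : Int × Int) (m1 m2 : Int) :
    (if PySem.Int.band a 1 ≠ 0 then (PySem.Int.bxor lh.1 m1, PySem.Int.bxor lh.2 m2) else lh)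
      = (PySem.Int.bxor lh.1 (PySem.Int.band a 1 * m1), PySem.Int.bxor lh.2 (PySem.Int.band a 1 * m2)) := by
  rcases pvBand1 a with hb | hb <;> rw [hb] <;> simp [PySem.Int.bxor_zero]

-- one binary digit of an XOR, peeled off (Nat level)
lemma pvNXor00 (u v : Nat) : (2*u) ^^^ (2*v) = 2*(u^^^v) := by
  rw [← Nat.bit_false_apply, ← Nat.bit_false_apply, Nat.xor_bit]; simp [Nat.bit_val]
lemma pvNXor10 (u v : Nat) : (2*u+1) ^^^ (2*v) = 2*(u^^^v)+1 := by
  rw [← Nat.bit_true_apply, ← Nat.bit_false_apply, Nat.xor_bit]; simp [Nat.bit_val]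
lemma pvNXor01 (u v : Nat) : (2*u) ^^^ (2*v+1) = 2*(u^^^v)+1 := by
  rw [← Nat.bit_false_apply, ← Nat.bit_true_apply, Nat.xor_bit]; simp [Nat.bit_val]
lemma pvNXor11 (u v : Nat) : (2*u+1) ^^^ (2*v+1) = 2*(u^^^v) := by
  rw [← Nat.bit_true_apply, ← Nat.bit_true_apply, Nat.xor_bit]; simp [Nat.bit_val]

-- one binary digit of an XOR, peeled off (Int level, nonneg tails, 0/1 heads)
lemma pvBxorStep (r s U V : Int) (hr : r = 0 ∨ r = 1) (hs : s = 0 ∨ s = 1)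
    (hU : 0 ≤ U) (hV : 0 ≤ V) :
    PySem.Int.bxor (r + 2*U) (s + 2*V) = PySem.Int.bxor r s + 2 * PySem.Int.bxor U V := by
  have hXU : PySem.Int.bxor U V = ((U.toNat ^^^ V.toNat : Nat) : Int) := PySem.Int.bxor_of_nonneg hU hV
  rcases hr with rfl | rfl <;> rcases hs with rfl | rfl <;>
    rw [PySem.Int.bxor_of_nonneg (by omega) (by omega), hXU]
  · rw [show (0+2*U).toNat = 2*U.toNat from by omega, show (0+2*V).toNat = 2*V.toNat from by omega,
      pvNXor00]
    push_cast
    simp [PySem.Int.bxor]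
    try ring
  · rw [show (0+2*U).toNat = 2*U.toNat from by omega, show (1+2*V).toNat = 2*V.toNat+1 from by omega,
      pvNXor01]
    push_cast
    simp [PySem.Int.bxor]
    try ring
  · rw [show (1+2*U).toNat = 2*U.toNat+1 from by omega, show (0+2*V).toNat = 2*V.toNat from by omega,
      pvNXor10]
    push_cast
    simp [PySem.Int.bxor]
    try ring
  · rw [show (1+2*U).toNat = 2*U.toNat+1 from by omega, show (1+2*V).toNat = 2*V.toNat+1 from by omega,
      pvNXor11]
    push_cast
    simp [PySem.Int.bxor]
    try ring

-- XOR of two 8-bit values given by their bits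
lemma pvMergeIB (a0 a1 a2 a3 a4 a5 a6 a7 b0 b1 b2 b3 b4 b5 b6 b7 : Bool) :
    PySem.Int.bxor (pvIB a0 + 2*(pvIB a1 + 2*(pvIB a2 + 2*(pvIB a3 + 2*(pvIB a4 + 2*(pvIB a5 + 2*(pvIB a6 + 2*pvIB a7))))))) (pvIB b0 + 2*(pvIB b1 + 2*(pvIB b2 + 2*(pvIB b3 + 2*(pvIB b4 + 2*(pvIB b5 + 2*(pvIB b6 + 2*pvIB b7)))))))
      = (pvIB (a0 ^^ b0) + 2*(pvIB (a1 ^^ b1) + 2*(pvIB (a2 ^^ b2) + 2*(pvIB (a3 ^^ b3) + 2*(pvIB (a4 ^^ b4) + 2*(pvIB (a5 ^^ b5) + 2*(pvIB (a6 ^^ b6) + 2*pvIB (a7 ^^ b7)))))))) := by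
  have hn : ∀ p : Bool, 0 ≤ pvIB p := by intro p; cases p <;> decide
  have hna0 := hn a0
  have hna1 := hn a1
  have hna2 := hn a2
  have hna3 := hn a3
  have hna4 := hn a4
  have hna5 := hn a5
  have hna6 := hn a6
  have hna7 := hn a7
  have hnb0 := hn b0
  have hnb1 := hn b1
  have hnb2 := hn b2
  have hnb3 := hn b3
  have hnb4 := hn b4
  have hnb5 := hn b5
  have hnb6 := hn b6
  have hnb7 := hn b7
  have ho : ∀ p : Bool, pvIB p = 0 ∨ pvIB p = 1 := by intro p; cases p <;> simp [pvIB]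
  rw [pvBxorStep _ _ _ _ (ho a0) (ho b0) (by omega) (by omega)]
  rw [pvBxorStep _ _ _ _ (ho a1) (ho b1) (by omega) (by omega)]
  rw [pvBxorStep _ _ _ _ (ho a2) (ho b2) (by omega) (by omega)]
  rw [pvBxorStep _ _ _ _ (ho a3) (ho b3) (by omega) (by omega)]
  rw [pvBxorStep _ _ _ _ (ho a4) (ho b4) (by omega) (by omega)]
  rw [pvBxorStep _ _ _ _ (ho a5) (ho b5) (by omega) (by omega)]
  rw [pvBxorStep _ _ _ _ (ho a6) (ho b6) (by omega) (by omega)]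
  simp only [pvXorIB]

-- bit decomposition of bit-times-mask products, one lemma per mask constant
lemma pvC2 (p : Bool) : pvIB p * 2 = (pvIB false + 2*(pvIB p + 2*(pvIB false + 2*(pvIB false + 2*(pvIB false + 2*(pvIB false + 2*(pvIB false + 2*pvIB false))))))) := by
  cases p <;> decide
lemma pvC4 (p : Bool) : pvIB p * 4 = (pvIB false + 2*(pvIB false + 2*(pvIB p + 2*(pvIB false + 2*(pvIB false + 2*(pvIB false + 2*(pvIB false + 2*pvIB false))))))) := by
  cases p <;> decide
lemma pvC11 (p : Bool) : pvIB p * 11 = (pvIB p + 2*(pvIB p + 2*(pvIB false + 2*(pvIB p + 2*(pvIB false + 2*(pvIB false + 2*(pvIB false + 2*pvIB false))))))) := by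
  cases p <;> decide
lemma pvC16 (p : Bool) : pvIB p * 16 = (pvIB false + 2*(pvIB false + 2*(pvIB false + 2*(pvIB false + 2*(pvIB p + 2*(pvIB false + 2*(pvIB false + 2*pvIB false))))))) := by
  cases p <;> decide
lemma pvC18 (p : Bool) : pvIB p * 18 = (pvIB false + 2*(pvIB p + 2*(pvIB false + 2*(pvIB false + 2*(pvIB p + 2*(pvIB false + 2*(pvIB false + 2*pvIB false))))))) := by
  cases p <;> decide
lemma pvC21 (p : Bool) : pvIB p * 21 = (pvIB p + 2*(pvIB false + 2*(pvIB p + 2*(pvIB false + 2*(pvIB p + 2*(pvIB false + 2*(pvIB false + 2*pvIB false))))))) := by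
  cases p <;> decide
lemma pvC22 (p : Bool) : pvIB p * 22 = (pvIB false + 2*(pvIB p + 2*(pvIB p + 2*(pvIB false + 2*(pvIB p + 2*(pvIB false + 2*(pvIB false + 2*pvIB false))))))) := by
  cases p <;> decide
lemma pvC33 (p : Bool) : pvIB p * 33 = (pvIB p + 2*(pvIB false + 2*(pvIB false + 2*(pvIB false + 2*(pvIB false + 2*(pvIB p + 2*(pvIB false + 2*pvIB false))))))) := by
  cases p <;> decide
lemma pvC36 (p : Bool) : pvIB p * 36 = (pvIB false + 2*(pvIB false + 2*(pvIB p + 2*(pvIB false + 2*(pvIB false + 2*(pvIB p + 2*(pvIB false + 2*pvIB false))))))) := by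
  cases p <;> decide
lemma pvC39 (p : Bool) : pvIB p * 39 = (pvIB p + 2*(pvIB p + 2*(pvIB p + 2*(pvIB false + 2*(pvIB false + 2*(pvIB p + 2*(pvIB false + 2*pvIB false))))))) := by
  cases p <;> decide
lemma pvC41 (p : Bool) : pvIB p * 41 = (pvIB p + 2*(pvIB false + 2*(pvIB false + 2*(pvIB p + 2*(pvIB false + 2*(pvIB p + 2*(pvIB false + 2*pvIB false))))))) := by
  cases p <;> decide
lemma pvC44 (p : Bool) : pvIB p * 44 = (pvIB false + 2*(pvIB false + 2*(pvIB p + 2*(pvIB p + 2*(pvIB false + 2*(pvIB p + 2*(pvIB false + 2*pvIB false))))))) := by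
  cases p <;> decide
lemma pvC47 (p : Bool) : pvIB p * 47 = (pvIB p + 2*(pvIB p + 2*(pvIB p + 2*(pvIB p + 2*(pvIB false + 2*(pvIB p + 2*(pvIB false + 2*pvIB false))))))) := by
  cases p <;> decide
lemma pvC53 (p : Bool) : pvIB p * 53 = (pvIB p + 2*(pvIB false + 2*(pvIB p + 2*(pvIB false + 2*(pvIB p + 2*(pvIB p + 2*(pvIB false + 2*pvIB false))))))) := by
  cases p <;> decide
lemma pvC66 (p : Bool) : pvIB p * 66 = (pvIB false + 2*(pvIB p + 2*(pvIB false + 2*(pvIB false + 2*(pvIB false + 2*(pvIB false + 2*(pvIB p + 2*pvIB false))))))) := by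
  cases p <;> decide
lemma pvC72 (p : Bool) : pvIB p * 72 = (pvIB false + 2*(pvIB false + 2*(pvIB false + 2*(pvIB p + 2*(pvIB false + 2*(pvIB false + 2*(pvIB p + 2*pvIB false))))))) := by
  cases p <;> decide
lemma pvC76 (p : Bool) : pvIB p * 76 = (pvIB false + 2*(pvIB false + 2*(pvIB p + 2*(pvIB p + 2*(pvIB false + 2*(pvIB false + 2*(pvIB p + 2*pvIB false))))))) := by
  cases p <;> decide
lemma pvC77 (p : Bool) : pvIB p * 77 = (pvIB p + 2*(pvIB false + 2*(pvIB p + 2*(pvIB p + 2*(pvIB false + 2*(pvIB false + 2*(pvIB p + 2*pvIB false))))))) := by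
  cases p <;> decide
lemma pvC79 (p : Bool) : pvIB p * 79 = (pvIB p + 2*(pvIB p + 2*(pvIB p + 2*(pvIB p + 2*(pvIB false + 2*(pvIB false + 2*(pvIB p + 2*pvIB false))))))) := by
  cases p <;> decide
lemma pvC80 (p : Bool) : pvIB p * 80 = (pvIB false + 2*(pvIB false + 2*(pvIB false + 2*(pvIB false + 2*(pvIB p + 2*(pvIB false + 2*(pvIB p + 2*pvIB false))))))) := by
  cases p <;> decide
lemma pvC88 (p : Bool) : pvIB p * 88 = (pvIB false + 2*(pvIB false + 2*(pvIB false + 2*(pvIB p + 2*(pvIB p + 2*(pvIB false + 2*(pvIB p + 2*pvIB false))))))) := by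
  cases p <;> decide
lemma pvC89 (p : Bool) : pvIB p * 89 = (pvIB p + 2*(pvIB false + 2*(pvIB false + 2*(pvIB p + 2*(pvIB p + 2*(pvIB false + 2*(pvIB p + 2*pvIB false))))))) := by
  cases p <;> decide
lemma pvC93 (p : Bool) : pvIB p * 93 = (pvIB p + 2*(pvIB false + 2*(pvIB p + 2*(pvIB p + 2*(pvIB p + 2*(pvIB false + 2*(pvIB p + 2*pvIB false))))))) := by
  cases p <;> decide
lemma pvC106 (p : Bool) : pvIB p * 106 = (pvIB false + 2*(pvIB p + 2*(pvIB false + 2*(pvIB p + 2*(pvIB false + 2*(pvIB p + 2*(pvIB p + 2*pvIB false))))))) := by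
  cases p <;> decide
lemma pvC113 (p : Bool) : pvIB p * 113 = (pvIB p + 2*(pvIB false + 2*(pvIB false + 2*(pvIB false + 2*(pvIB p + 2*(pvIB p + 2*(pvIB p + 2*pvIB false))))))) := by
  cases p <;> decide
lemma pvC116 (p : Bool) : pvIB p * 116 = (pvIB false + 2*(pvIB false + 2*(pvIB p + 2*(pvIB false + 2*(pvIB p + 2*(pvIB p + 2*(pvIB p + 2*pvIB false))))))) := by
  cases p <;> decide
lemma pvC123 (p : Bool) : pvIB p * 123 = (pvIB p + 2*(pvIB p + 2*(pvIB false + 2*(pvIB p + 2*(pvIB p + 2*(pvIB p + 2*(pvIB p + 2*pvIB false))))))) := by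
  cases p <;> decide
lemma pvC128 (p : Bool) : pvIB p * 128 = (pvIB false + 2*(pvIB false + 2*(pvIB false + 2*(pvIB false + 2*(pvIB false + 2*(pvIB false + 2*(pvIB false + 2*pvIB p))))))) := by
  cases p <;> decide
lemma pvC132 (p : Bool) : pvIB p * 132 = (pvIB false + 2*(pvIB false + 2*(pvIB p + 2*(pvIB false + 2*(pvIB false + 2*(pvIB false + 2*(pvIB false + 2*pvIB p))))))) := by
  cases p <;> decide
lemma pvC149 (p : Bool) : pvIB p * 149 = (pvIB p + 2*(pvIB false + 2*(pvIB p + 2*(pvIB false + 2*(pvIB p + 2*(pvIB false + 2*(pvIB false + 2*pvIB p))))))) := by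
  cases p <;> decide
lemma pvC150 (p : Bool) : pvIB p * 150 = (pvIB false + 2*(pvIB p + 2*(pvIB p + 2*(pvIB false + 2*(pvIB p + 2*(pvIB false + 2*(pvIB false + 2*pvIB p))))))) := by
  cases p <;> decide
lemma pvC157 (p : Bool) : pvIB p * 157 = (pvIB p + 2*(pvIB false + 2*(pvIB p + 2*(pvIB p + 2*(pvIB p + 2*(pvIB false + 2*(pvIB false + 2*pvIB p))))))) := by
  cases p <;> decide
lemma pvC159 (p : Bool) : pvIB p * 159 = (pvIB p + 2*(pvIB p + 2*(pvIB p + 2*(pvIB p + 2*(pvIB p + 2*(pvIB false + 2*(pvIB false + 2*pvIB p))))))) := by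
  cases p <;> decide
lemma pvC160 (p : Bool) : pvIB p * 160 = (pvIB false + 2*(pvIB false + 2*(pvIB false + 2*(pvIB false + 2*(pvIB false + 2*(pvIB p + 2*(pvIB false + 2*pvIB p))))))) := by
  cases p <;> decide
lemma pvC161 (p : Bool) : pvIB p * 161 = (pvIB p + 2*(pvIB false + 2*(pvIB false + 2*(pvIB false + 2*(pvIB false + 2*(pvIB p + 2*(pvIB false + 2*pvIB p))))))) := by
  cases p <;> decide
lemma pvC176 (p : Bool) : pvIB p * 176 = (pvIB false + 2*(pvIB false + 2*(pvIB false + 2*(pvIB false + 2*(pvIB p + 2*(pvIB p + 2*(pvIB false + 2*pvIB p))))))) := by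
  cases p <;> decide
lemma pvC178 (p : Bool) : pvIB p * 178 = (pvIB false + 2*(pvIB p + 2*(pvIB false + 2*(pvIB false + 2*(pvIB p + 2*(pvIB p + 2*(pvIB false + 2*pvIB p))))))) := by
  cases p <;> decide
lemma pvC206 (p : Bool) : pvIB p * 206 = (pvIB false + 2*(pvIB p + 2*(pvIB p + 2*(pvIB p + 2*(pvIB false + 2*(pvIB false + 2*(pvIB p + 2*pvIB p))))))) := by
  cases p <;> decide
lemma pvC209 (p : Bool) : pvIB p * 209 = (pvIB p + 2*(pvIB false + 2*(pvIB false + 2*(pvIB false + 2*(pvIB p + 2*(pvIB false + 2*(pvIB p + 2*pvIB p))))))) := by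
  cases p <;> decide
lemma pvC212 (p : Bool) : pvIB p * 212 = (pvIB false + 2*(pvIB false + 2*(pvIB p + 2*(pvIB false + 2*(pvIB p + 2*(pvIB false + 2*(pvIB p + 2*pvIB p))))))) := by
  cases p <;> decide
lemma pvC232 (p : Bool) : pvIB p * 232 = (pvIB false + 2*(pvIB false + 2*(pvIB false + 2*(pvIB p + 2*(pvIB false + 2*(pvIB p + 2*(pvIB p + 2*pvIB p))))))) := by
  cases p <;> decide
lemma pvC248 (p : Bool) : pvIB p * 248 = (pvIB false + 2*(pvIB false + 2*(pvIB false + 2*(pvIB p + 2*(pvIB p + 2*(pvIB p + 2*(pvIB p + 2*pvIB p))))))) := by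
  cases p <;> decide

-- the |=-packing loop as a plain sum of binary digits
lemma pvPack8 (x0 x1 x2 x3 x4 x5 x6 x7 : Int) (h0 : x0 = 0 ∨ x0 = 1) (h1 : x1 = 0 ∨ x1 = 1) (h2 : x2 = 0 ∨ x2 = 1) (h3 : x3 = 0 ∨ x3 = 1) (h4 : x4 = 0 ∨ x4 = 1) (h5 : x5 = 0 ∨ x5 = 1) (h6 : x6 = 0 ∨ x6 = 1) (h7 : x7 = 0 ∨ x7 = 1) :
    (PySem.Int.bor (PySem.Int.bor (PySem.Int.bor (PySem.Int.bor (PySem.Int.bor (PySem.Int.bor (PySem.Int.bor (PySem.Int.bor (0 : Int) (x0 <<< (0 : Nat))) (x1 <<< (1 : Nat))) (x2 <<< (2 : Nat))) (x3 <<< (3 : Nat))) (x4 <<< (4 : Nat))) (x5 <<< (5 : Nat))) (x6 <<< (6 : Nat))) (x7 <<< (7 : Nat))) = (x0 + 2*(x1 + 2*(x2 + 2*(x3 + 2*(x4 + 2*(x5 + 2*(x6 + 2*x7))))))) := by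
  rcases h0 with rfl | rfl <;> rcases h1 with rfl | rfl <;> rcases h2 with rfl | rfl <;> rcases h3 with rfl | rfl <;> rcases h4 with rfl | rfl <;> rcases h5 with rfl | rfl <;> rcases h6 with rfl | rfl <;> rcases h7 with rfl | rfl <;> decide

lemma pvPackLow (c : List Int) :
    (PySem.List.pyRange 0 8 1).foldl
      (fun low i => PySem.Int.bor low (PySem.Int.band (PySem.List.pyGetD c i 0) 1 <<< i.toNat)) 0
      = ((PySem.Int.band (PySem.List.pyGetD c 0 0) 1) + 2*((PySem.Int.band (PySem.List.pyGetD c 1 0) 1) + 2*((PySem.Int.band (PySem.List.pyGetD c 2 0) 1) + 2*((PySem.Int.band (PySem.List.pyGetD c 3 0) 1) + 2*((PySem.Int.band (PySem.List.pyGetD c 4 0) 1) + 2*((PySem.Int.band (PySem.List.pyGetD c 5 0) 1) + 2*((PySem.Int.band (PySem.List.pyGetD c 6 0) 1) + 2*(PySem.Int.band (PySem.List.pyGetD c 7 0) 1)))))))) := by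
  rw [show PySem.List.pyRange 0 8 1 = [0,1,2,3,4,5,6,7] from by decide]
  simp only [List.foldl,
    show ((0:Int)).toNat = 0 from rfl, show ((1:Int)).toNat = 1 from rfl,
    show ((2:Int)).toNat = 2 from rfl, show ((3:Int)).toNat = 3 from rfl,
    show ((4:Int)).toNat = 4 from rfl, show ((5:Int)).toNat = 5 from rfl,
    show ((6:Int)).toNat = 6 from rfl, show ((7:Int)).toNat = 7 from rfl]
  exact pvPack8 _ _ _ _ _ _ _ _ (pvBand1 _) (pvBand1 _) (pvBand1 _) (pvBand1 _)
    (pvBand1 _) (pvBand1 _) (pvBand1 _) (pvBand1 _)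

lemma pvPackHigh (c : List Int) :
    (PySem.List.pyRange 8 16 1).foldl
      (fun high i => PySem.Int.bor high (PySem.Int.band (PySem.List.pyGetD c i 0) 1 <<< (i - 8).toNat)) 0
      = ((PySem.Int.band (PySem.List.pyGetD c 8 0) 1) + 2*((PySem.Int.band (PySem.List.pyGetD c 9 0) 1) + 2*((PySem.Int.band (PySem.List.pyGetD c 10 0) 1) + 2*((PySem.Int.band (PySem.List.pyGetD c 11 0) 1) + 2*((PySem.Int.band (PySem.List.pyGetD c 12 0) 1) + 2*((PySem.Int.band (PySem.List.pyGetD c 13 0) 1) + 2*((PySem.Int.band (PySem.List.pyGetD c 14 0) 1) + 2*(PySem.Int.band (PySem.List.pyGetD c 15 0) 1)))))))) := by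
  rw [show PySem.List.pyRange 8 16 1 = [8,9,10,11,12,13,14,15] from by decide]
  simp only [List.foldl,
    show ((8:Int)-8).toNat = 0 from rfl, show ((9:Int)-8).toNat = 1 from rfl,
    show ((10:Int)-8).toNat = 2 from rfl, show ((11:Int)-8).toNat = 3 from rfl,
    show ((12:Int)-8).toNat = 4 from rfl, show ((13:Int)-8).toNat = 5 from rfl,
    show ((14:Int)-8).toNat = 6 from rfl, show ((15:Int)-8).toNat = 7 from rfl]
  exact pvPack8 _ _ _ _ _ _ _ _ (pvBand1 _) (pvBand1 _) (pvBand1 _) (pvBand1 _)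
    (pvBand1 _) (pvBand1 _) (pvBand1 _) (pvBand1 _)

-- per-CRC-bit reordering of the same XOR chain (A's term order to byte/bit-ascending order)
lemma pvEq0 : ∀ (p00 p32 p40 p44 p53 p56 : Bool), (p00 ^^ p32 ^^ p44 ^^ p40 ^^ p56 ^^ p53) = (p00 ^^ p32 ^^ p40 ^^ p44 ^^ p53 ^^ p56) := by
  decide
lemma pvEq1 : ∀ (p04 p41 p45 p54 p57 : Bool), (p04 ^^ p45 ^^ p41 ^^ p57 ^^ p54) = (p04 ^^ p41 ^^ p45 ^^ p54 ^^ p57) := by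
  decide
lemma pvEq2 : ∀ (p04 p07 p34 p40 p42 p46 p55 : Bool), (p07 ^^ p04 ^^ p34 ^^ p46 ^^ p42 ^^ p40 ^^ p55) = (p04 ^^ p07 ^^ p34 ^^ p40 ^^ p42 ^^ p46 ^^ p55) := by
  decide
lemma pvEq3 : ∀ (p04 p07 p35 p41 p43 p47 p56 : Bool), (p07 ^^ p04 ^^ p35 ^^ p47 ^^ p43 ^^ p41 ^^ p56) = (p04 ^^ p07 ^^ p35 ^^ p41 ^^ p43 ^^ p47 ^^ p56) := by
  decide
lemma pvEq4 : ∀ (p00 p32 p34 p40 p42 p43 p45 p50 p52 p56 p57 : Bool), (p00 ^^ p34 ^^ p32 ^^ p45 ^^ p43 ^^ p42 ^^ p40 ^^ p57 ^^ p56 ^^ p52 ^^ p50) = (p00 ^^ p32 ^^ p34 ^^ p40 ^^ p42 ^^ p43 ^^ p45 ^^ p50 ^^ p52 ^^ p56 ^^ p57) := by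
  decide
lemma pvEq5 : ∀ (p32 p34 p35 p40 p41 p43 p44 p46 p51 p53 p57 : Bool), (p35 ^^ p34 ^^ p32 ^^ p46 ^^ p44 ^^ p43 ^^ p41 ^^ p40 ^^ p57 ^^ p53 ^^ p51) = (p32 ^^ p34 ^^ p35 ^^ p40 ^^ p41 ^^ p43 ^^ p44 ^^ p46 ^^ p51 ^^ p53 ^^ p57) := by
  decide
lemma pvEq6 : ∀ (p00 p04 p07 p32 p34 p35 p41 p42 p43 p47 p50 p54 p56 : Bool), (p07 ^^ p04 ^^ p00 ^^ p35 ^^ p34 ^^ p32 ^^ p47 ^^ p43 ^^ p42 ^^ p41 ^^ p56 ^^ p54 ^^ p50) = (p00 ^^ p04 ^^ p07 ^^ p32 ^^ p34 ^^ p35 ^^ p41 ^^ p42 ^^ p43 ^^ p47 ^^ p50 ^^ p54 ^^ p56) := by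
  decide
lemma pvEq7 : ∀ (p00 p04 p35 p36 p42 p43 p44 p51 p55 p57 : Bool), (p04 ^^ p00 ^^ p36 ^^ p35 ^^ p44 ^^ p43 ^^ p42 ^^ p57 ^^ p55 ^^ p51) = (p00 ^^ p04 ^^ p35 ^^ p36 ^^ p42 ^^ p43 ^^ p44 ^^ p51 ^^ p55 ^^ p57) := by
  decide
lemma pvEq8 : ∀ (p04 p07 p32 p36 p43 p45 p46 p47 p50 p51 p56 p57 : Bool), (p07 ^^ p04 ^^ p36 ^^ p32 ^^ p47 ^^ p46 ^^ p45 ^^ p43 ^^ p57 ^^ p56 ^^ p51 ^^ p50) = (p04 ^^ p07 ^^ p32 ^^ p36 ^^ p43 ^^ p45 ^^ p46 ^^ p47 ^^ p50 ^^ p51 ^^ p56 ^^ p57) := by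
  decide
lemma pvEq9 : ∀ (p04 p34 p36 p40 p43 p44 p45 p50 p52 p56 : Bool), (p04 ^^ p36 ^^ p34 ^^ p45 ^^ p44 ^^ p43 ^^ p40 ^^ p56 ^^ p52 ^^ p50) = (p04 ^^ p34 ^^ p36 ^^ p40 ^^ p43 ^^ p44 ^^ p45 ^^ p50 ^^ p52 ^^ p56) := by
  decide
lemma pvEq10 : ∀ (p07 p32 p35 p36 p40 p41 p43 p46 p50 p51 p52 p53 p56 p57 : Bool), (p07 ^^ p36 ^^ p35 ^^ p32 ^^ p46 ^^ p43 ^^ p41 ^^ p40 ^^ p57 ^^ p56 ^^ p53 ^^ p52 ^^ p51 ^^ p50) = (p07 ^^ p32 ^^ p35 ^^ p36 ^^ p40 ^^ p41 ^^ p43 ^^ p46 ^^ p50 ^^ p51 ^^ p52 ^^ p53 ^^ p56 ^^ p57) := by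
  decide
lemma pvEq11 : ∀ (p00 p04 p32 p41 p42 p43 p45 p47 p50 p51 p53 p54 p56 p57 : Bool), (p04 ^^ p00 ^^ p32 ^^ p47 ^^ p45 ^^ p43 ^^ p42 ^^ p41 ^^ p57 ^^ p56 ^^ p54 ^^ p53 ^^ p51 ^^ p50) = (p00 ^^ p04 ^^ p32 ^^ p41 ^^ p42 ^^ p43 ^^ p45 ^^ p47 ^^ p50 ^^ p51 ^^ p53 ^^ p54 ^^ p56 ^^ p57) := by
  decide
lemma pvEq12 : ∀ (p04 p07 p40 p42 p43 p44 p46 p51 p52 p54 p55 p57 : Bool), (p07 ^^ p04 ^^ p46 ^^ p44 ^^ p43 ^^ p42 ^^ p40 ^^ p57 ^^ p55 ^^ p54 ^^ p52 ^^ p51) = (p04 ^^ p07 ^^ p40 ^^ p42 ^^ p43 ^^ p44 ^^ p46 ^^ p51 ^^ p52 ^^ p54 ^^ p55 ^^ p57) := by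
  decide
lemma pvEq13 : ∀ (p00 p04 p36 p41 p47 p50 p53 p55 : Bool), (p04 ^^ p00 ^^ p36 ^^ p47 ^^ p41 ^^ p55 ^^ p53 ^^ p50) = (p00 ^^ p04 ^^ p36 ^^ p41 ^^ p47 ^^ p50 ^^ p53 ^^ p55) := by
  decide
lemma pvEq14 : ∀ (p00 p04 p32 p42 p51 p54 p56 : Bool), (p04 ^^ p00 ^^ p32 ^^ p42 ^^ p56 ^^ p54 ^^ p51) = (p00 ^^ p04 ^^ p32 ^^ p42 ^^ p51 ^^ p54 ^^ p56) := by
  decide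
lemma pvEq15 : ∀ (p00 p07 p43 p52 p55 p57 : Bool), (p07 ^^ p00 ^^ p43 ^^ p57 ^^ p55 ^^ p52) = (p00 ^^ p07 ^^ p43 ^^ p52 ^^ p55 ^^ p57) := by
  decide

-- ===== VERDICT (by name: the statement is the Claim_ definition above) =====
set_option maxHeartbeats 4000000 in
theorem compute_crc_from_6bytes_spec : Claim_equal_compute_crc_from_6bytes := by
  intro B _ hP
  unfold Spec_compute_crc_from_6bytes
  match B, hP with
  | b0 :: b1 :: b2 :: b3 :: b4 :: b5 :: rest, _ =>
    obtain ⟨p00, h00⟩ := pvAtom (b0 >>> (0 : Nat))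
    obtain ⟨p04, h04⟩ := pvAtom (b0 >>> (4 : Nat))
    obtain ⟨p07, h07⟩ := pvAtom (b0 >>> (7 : Nat))
    obtain ⟨p32, h32⟩ := pvAtom (b3 >>> (2 : Nat))
    obtain ⟨p34, h34⟩ := pvAtom (b3 >>> (4 : Nat))
    obtain ⟨p35, h35⟩ := pvAtom (b3 >>> (5 : Nat))
    obtain ⟨p36, h36⟩ := pvAtom (b3 >>> (6 : Nat))
    obtain ⟨p40, h40⟩ := pvAtom (b4 >>> (0 : Nat))
    obtain ⟨p41, h41⟩ := pvAtom (b4 >>> (1 : Nat))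
    obtain ⟨p42, h42⟩ := pvAtom (b4 >>> (2 : Nat))
    obtain ⟨p43, h43⟩ := pvAtom (b4 >>> (3 : Nat))
    obtain ⟨p44, h44⟩ := pvAtom (b4 >>> (4 : Nat))
    obtain ⟨p45, h45⟩ := pvAtom (b4 >>> (5 : Nat))
    obtain ⟨p46, h46⟩ := pvAtom (b4 >>> (6 : Nat))
    obtain ⟨p47, h47⟩ := pvAtom (b4 >>> (7 : Nat))
    obtain ⟨p50, h50⟩ := pvAtom (b5 >>> (0 : Nat))
    obtain ⟨p51, h51⟩ := pvAtom (b5 >>> (1 : Nat))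
    obtain ⟨p52, h52⟩ := pvAtom (b5 >>> (2 : Nat))
    obtain ⟨p53, h53⟩ := pvAtom (b5 >>> (3 : Nat))
    obtain ⟨p54, h54⟩ := pvAtom (b5 >>> (4 : Nat))
    obtain ⟨p55, h55⟩ := pvAtom (b5 >>> (5 : Nat))
    obtain ⟨p56, h56⟩ := pvAtom (b5 >>> (6 : Nat))
    obtain ⟨p57, h57⟩ := pvAtom (b5 >>> (7 : Nat))
    simp only [compute_crc_from_6bytes, compute_crc_from_6bytes_alt]
    simp only [pvPackLow, pvPackHigh]
    simp only [pvColumns, pvBit,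
      show PySem.List.pyRange 0 8 1 = [0,1,2,3,4,5,6,7] from by decide,
      List.foldl, PySem.List.pyGet?_natCast, List.getElem?_cons_succ,
      List.getElem?_cons_zero, Option.getD_some, PySem.List.pyGetD_ofNat',
      List.getD_cons_succ, List.getD_cons_zero,
      show ((0:Int)).toNat = 0 from rfl, show ((1:Int)).toNat = 1 from rfl,
      show ((2:Int)).toNat = 2 from rfl, show ((3:Int)).toNat = 3 from rfl,
      show ((4:Int)).toNat = 4 from rfl, show ((5:Int)).toNat = 5 from rfl,
      show ((6:Int)).toNat = 6 from rfl, show ((7:Int)).toNat = 7 from rfl,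
      pv_ite, mul_zero, PySem.Int.bxor_zero]
    simp only [h00, h04, h07, h32, h34, h35, h36, h40, h41, h42, h43, h44, h45, h46, h47, h50, h51, h52, h53, h54, h55, h56, h57]
    simp only [pvC2, pvC4, pvC11, pvC16, pvC18, pvC21, pvC22, pvC33, pvC36, pvC39, pvC41, pvC44, pvC47, pvC53, pvC66, pvC72, pvC76, pvC77, pvC79, pvC80, pvC88, pvC89, pvC93, pvC106, pvC113, pvC116, pvC123, pvC128, pvC132, pvC149, pvC150, pvC157, pvC159, pvC160, pvC161, pvC176, pvC178, pvC206, pvC209, pvC212, pvC232, pvC248, pvXorIB, pvBandIB, pvBxor0]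
    simp only [pvMergeIB, Bool.xor_false, Bool.false_xor]
    rw [pvEq0 p00 p32 p40 p44 p53 p56, pvEq1 p04 p41 p45 p54 p57, pvEq2 p04 p07 p34 p40 p42 p46 p55, pvEq3 p04 p07 p35 p41 p43 p47 p56, pvEq4 p00 p32 p34 p40 p42 p43 p45 p50 p52 p56 p57, pvEq5 p32 p34 p35 p40 p41 p43 p44 p46 p51 p53 p57, pvEq6 p00 p04 p07 p32 p34 p35 p41 p42 p43 p47 p50 p54 p56, pvEq7 p00 p04 p35 p36 p42 p43 p44 p51 p55 p57, pvEq8 p04 p07 p32 p36 p43 p45 p46 p47 p50 p51 p56 p57, pvEq9 p04 p34 p36 p40 p43 p44 p45 p50 p52 p56, pvEq10 p07 p32 p35 p36 p40 p41 p43 p46 p50 p51 p52 p53 p56 p57, pvEq11 p00 p04 p32 p41 p42 p43 p45 p47 p50 p51 p53 p54 p56 p57, pvEq12 p04 p07 p40 p42 p43 p44 p46 p51 p52 p54 p55 p57, pvEq13 p00 p04 p36 p41 p47 p50 p53 p55, pvEq14 p00 p04 p32 p42 p51 p54 p56, pvEq15 p00 p07 p43 p52 p55 p57]
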